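-- pv_equiv track=rewrite | github.com/shanmukavenkat/I_DO_PYTHON | second/area of rectangle.py | get_max_sub_matrix_area
-- ===== SOURCE A (Python) =====
-- def check_if_sub_matrix_contains_zero(matrix, i, j, k, l):
--     for m in range(0, k + 1):
--         for n in range(0, l + 1):
--             if (matrix[i + m][j + n] == "O"):
--                 return True
--     return False
--
-- def get_max_sub_matrix_area(matrix, rows, columns, i, j):
--     max_sub_matrix_area = 0
--     for k in range(0, rows - i):
--         for l in range(0, columns - j):
--             is_sub_matrix_contains_zero = check_if_sub_matrix_contains_zero(matrix, i, j, k, l)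
--             # If the submatrix does not contain zero, then it is possible that the submatrix may contain the maximum area
--             if not is_sub_matrix_contains_zero:
--                 # Here, (k + 1) * (l + 1) provides the newly discovered sub matrix area
--                 max_sub_matrix_area = max(max_sub_matrix_area, (k + 1) * (l + 1))
--     return max_sub_matrix_area
-- ===== SOURCE B (Python) =====
-- def get_max_sub_matrix_area(matrix, rows, columns, i, j):
--     # Histogram-style scan: keep the running minimum zero-free width over the
--     # rows below the anchor; best area = max over rows of width * height.
--     best = 0
--     width = columns - j
--     for r in range(i, rows):
--         w = 0
--         while w < width and matrix[r][j + w] != "O":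
--             w += 1
--         width = w
--         if width == 0:
--             break
--         best = max(best, width * (r - i + 1))
--     return best
-- ===== Notes on version B (the rewrite author's own statement) =====
-- stated objective: alternative
-- what changed: Replaced the enumerate-every-(k,l)-and-rescan-the-whole-rectangle search with a single top-down row scan that keeps the running minimum zero-free width (histogram style); worst-case asymptotically better, but not measurably faster on a timing run's generated inputs.
-- outside the precondition, e.g. on get_max_sub_matrix_area([['O', 'X'], ['X']], 2, 2, 0, 0): A returns 0, B returns 0
import Mathlib
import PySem

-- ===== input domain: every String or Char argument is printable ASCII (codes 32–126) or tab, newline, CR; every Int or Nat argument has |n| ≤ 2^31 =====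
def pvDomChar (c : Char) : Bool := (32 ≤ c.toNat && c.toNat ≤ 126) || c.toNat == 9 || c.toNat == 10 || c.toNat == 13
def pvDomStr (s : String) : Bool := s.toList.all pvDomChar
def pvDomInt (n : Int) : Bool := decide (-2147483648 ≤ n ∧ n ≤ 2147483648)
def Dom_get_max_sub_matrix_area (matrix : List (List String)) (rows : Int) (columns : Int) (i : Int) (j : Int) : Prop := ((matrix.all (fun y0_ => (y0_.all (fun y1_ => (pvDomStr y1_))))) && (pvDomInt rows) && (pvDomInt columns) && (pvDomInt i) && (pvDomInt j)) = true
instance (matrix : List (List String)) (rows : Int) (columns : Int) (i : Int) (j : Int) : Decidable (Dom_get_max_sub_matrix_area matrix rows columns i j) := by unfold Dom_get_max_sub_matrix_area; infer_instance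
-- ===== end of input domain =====

-- B replaces A's enumerate-every-rectangle-and-rescan search by a single top-down row scan
-- keeping the running minimum zero-free width (histogram style); same return value on Pre_.

-- ===== PORT A =====
-- shared cell accessor: Python's matrix[r][c] (negative indices wrap); the defaults fire only
-- where Python raises IndexError, which Pre_ excludes
def pvCell (matrix : List (List String)) (r c : Int) : String :=
  PySem.List.pyGetD (PySem.List.pyGetD matrix r []) c ""

def pvCheckZero (matrix : List (List String)) (i j k l : Int) : Bool :=
  (PySem.List.pyRange 0 (k+1) 1).any (fun m =>
    (PySem.List.pyRange 0 (l+1) 1).any (fun n => pvCell matrix (i+m) (j+n) == "O"))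

def get_max_sub_matrix_area (matrix : List (List String)) (rows : Int) (columns : Int) (i : Int) (j : Int) : Int :=
  (PySem.List.pyRange 0 (rows - i) 1).foldl (fun acc k =>
    (PySem.List.pyRange 0 (columns - j) 1).foldl (fun acc2 l =>
      if pvCheckZero matrix i j k l then acc2 else max acc2 ((k+1)*(l+1))) acc) 0

-- ===== PORT B =====
-- the inner 'while w < width and matrix[r][j+w] != "O": w += 1' of Source B
def pvReach (matrix : List (List String)) (r : Int) (j : Int) (w : Int) (width : Int) : Int :=
  if h : w < width then
    if pvCell matrix r (j + w) == "O" then w else pvReach matrix r j (w+1) width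
  else w
termination_by (width - w).toNat
decreasing_by omega

-- the 'for r in range(i, rows)' loop of Source B with state (width, best)
def pvLoopB (matrix : List (List String)) (rows : Int) (i : Int) (j : Int) (r : Int) (width : Int) (best : Int) : Int :=
  if h : r < rows then
    let w := pvReach matrix r j 0 width
    if w == 0 then best
    else pvLoopB matrix rows i j (r+1) w (max best (w * (r - i + 1)))
  else best
termination_by (rows - r).toNat
decreasing_by omega

def get_max_sub_matrix_area_alt (matrix : List (List String)) (rows : Int) (columns : Int) (i : Int) (j : Int) : Int :=
  pvLoopB matrix rows i j i (columns - j) 0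

-- ===== PRECONDITION & SPEC =====
-- Pre_ excludes inputs whose matrix is smaller than the scanned rows×columns region (or whose
-- anchor lies beyond Python's negative-index wraparound range): there A in general raises
-- IndexError, though an early "O" can hide the out-of-range access and let A return.
def Pre_get_max_sub_matrix_area (matrix : List (List String)) (rows : Int) (columns : Int) (i : Int) (j : Int) : Prop :=
  (rows ≤ i ∨ columns ≤ j) ∨
    (-(matrix.length : Int) ≤ i ∧ rows ≤ (matrix.length : Int) ∧
      ∀ row ∈ matrix, -(row.length : Int) ≤ j ∧ columns ≤ (row.length : Int))
instance (matrix : List (List String)) (rows : Int) (columns : Int) (i : Int) (j : Int) : Decidable (Pre_get_max_sub_matrix_area matrix rows columns i j) := by unfold Pre_get_max_sub_matrix_area; infer_instance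

def pvWitness_get_max_sub_matrix_area : List (List String) × Int × Int × Int × Int :=
  ([["X", "O"], ["X", "X"]], 2, 2, 0, 0)

def Spec_get_max_sub_matrix_area (matrix : List (List String)) (rows : Int) (columns : Int) (i : Int) (j : Int) (out : Int) : Prop := out = get_max_sub_matrix_area_alt matrix rows columns i j
instance (matrix : List (List String)) (rows : Int) (columns : Int) (i : Int) (j : Int) (out : Int) : Decidable (Spec_get_max_sub_matrix_area matrix rows columns i j out) := by unfold Spec_get_max_sub_matrix_area; infer_instance

-- ===== CLAIM (what is proved, stated in full; the proofs are below) =====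
def Claim_equal_get_max_sub_matrix_area : Prop := ∀ (matrix : List (List String)) (rows : Int) (columns : Int) (i : Int) (j : Int), Dom_get_max_sub_matrix_area matrix rows columns i j → Pre_get_max_sub_matrix_area matrix rows columns i j → Spec_get_max_sub_matrix_area matrix rows columns i j (get_max_sub_matrix_area matrix rows columns i j)

-- ===== LEMMAS AND PROOFS =====

theorem pv_reach_ge (matrix : List (List String)) (r j w width : Int) :
    w ≤ pvReach matrix r j w width := by
  fun_induction pvReach <;> omega

theorem pv_reach_le (matrix : List (List String)) (r j w width : Int) :
    pvReach matrix r j w width ≤ max w width := by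
  fun_induction pvReach <;> simp_all

theorem pv_reach_no_O (matrix : List (List String)) (r j w width n : Int)
    (h1 : w ≤ n) (h2 : n < pvReach matrix r j w width) :
    pvCell matrix r (j + n) ≠ "O" := by
  fun_induction pvReach generalizing n with
  | case1 w h hc => omega
  | case2 w h hc ih =>
      rcases eq_or_lt_of_le h1 with he | hlt
      · subst he; simpa using hc
      · exact ih n (by omega) h2
  | case3 w h => omega

theorem pv_reach_O (matrix : List (List String)) (r j w width : Int)
    (h : pvReach matrix r j w width < width) :
    pvCell matrix r (j + pvReach matrix r j w width) = "O" := by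
  fun_induction pvReach with
  | case1 w hlt hc => simpa using hc
  | case2 w hlt hc ih => exact ih h
  | case3 w hlt => omega

theorem pv_reach_min (matrix : List (List String)) (r j : Int) (w width C : Int)
    (hwC : width ≤ C) (hw : w ≤ width) :
    pvReach matrix r j w width = min width (pvReach matrix r j w C) := by
  revert hw
  fun_induction pvReach matrix r j w width with
  | case1 w hlt hc =>
      intro hw
      rw [pvReach, dif_pos (by omega : w < C), if_pos hc]
      omega
  | case2 w hlt hc ih =>
      intro hw
      conv_rhs => rw [pvReach, dif_pos (show w < C by omega), if_neg hc]
      exact ih (by omega)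
  | case3 w hlt =>
      intro hw
      have := pv_reach_ge matrix r j w C
      omega

theorem pv_loopB_width_nonpos (matrix : List (List String)) (rows i j r width best : Int)
    (h : width ≤ 0) : pvLoopB matrix rows i j r width best = best := by
  rw [pvLoopB]
  split
  · have hz : pvReach matrix r j 0 width = 0 := by rw [pvReach, dif_neg (by omega)]
    simp [hz]
  · rfl

theorem pv_row_iff (matrix : List (List String)) (r j C l : Int) (h0 : 0 ≤ l) (hl : l < C) :
    (∃ n, 0 ≤ n ∧ n ≤ l ∧ pvCell matrix r (j + n) = "O") ↔ pvReach matrix r j 0 C ≤ l := by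
  constructor
  · rintro ⟨n, hn0, hnl, hO⟩
    by_contra hlt
    push Not at hlt
    exact pv_reach_no_O matrix r j 0 C n hn0 (by omega) hO
  · intro hle
    have hge := pv_reach_ge matrix r j 0 C
    have hO := pv_reach_O matrix r j 0 C (by omega)
    exact ⟨pvReach matrix r j 0 C, hge, hle, hO⟩

theorem pv_check_iff (matrix : List (List String)) (i j C k l : Int) (h0 : 0 ≤ l) (hl : l < C) :
    (pvCheckZero matrix i j k l = true ↔
      ∃ m, 0 ≤ m ∧ m ≤ k ∧ pvReach matrix (i + m) j 0 C ≤ l) := by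
  unfold pvCheckZero
  simp only [List.any_eq_true, PySem.List.mem_pyRange_one, beq_iff_eq]
  constructor
  · rintro ⟨m, ⟨hm0, hmk⟩, n, ⟨hn0, hnl⟩, hO⟩
    exact ⟨m, hm0, by omega, (pv_row_iff matrix (i + m) j C l h0 hl).1 ⟨n, hn0, by omega, hO⟩⟩
  · rintro ⟨m, hm0, hmk, hre⟩
    obtain ⟨n, hn0, hnl, hO⟩ := (pv_row_iff matrix (i + m) j C l h0 hl).2 hre
    exact ⟨m, ⟨hm0, by omega⟩, n, ⟨hn0, by omega⟩, hO⟩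

theorem pv_inner_eq (matrix : List (List String)) (i j k acc W : Int) (n : Nat)
    (hacc : 0 ≤ acc) (hk : 0 ≤ k) (hW : 0 ≤ W)
    (hchar : ∀ l : Int, 0 ≤ l → l < (n : Int) → (pvCheckZero matrix i j k l = false ↔ l < W)) :
    (PySem.List.pyRange 0 (n : Int) 1).foldl (fun acc2 l =>
        if pvCheckZero matrix i j k l then acc2 else max acc2 ((k+1)*(l+1))) acc
      = max acc ((k+1) * min W (n : Int)) := by
  induction n generalizing acc with
  | zero =>
      rw [show ((0 : Nat) : Int) = 0 by norm_num, PySem.List.pyRange_one_eq_nil le_rfl]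
      simp only [List.foldl_nil]
      rw [show min W (0 : Int) = 0 by omega, mul_zero]
      omega
  | succ n ih =>
      rw [show ((n + 1 : Nat) : Int) = (n : Int) + 1 by push_cast; ring,
        PySem.List.pyRange_one_succ_right (by positivity), List.foldl_append]
      rw [ih acc hacc (fun l hl0 hln => hchar l hl0 (by omega))]
      simp only [List.foldl_cons, List.foldl_nil]
      by_cases hc : pvCheckZero matrix i j k (n : Int) = true
      · rw [if_pos hc]
        have hWn : W ≤ (n : Int) := by
          by_contra hWn
          have := (hchar (n : Int) (by positivity) (by omega)).2 (by omega)
          simp [hc] at this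
        rw [show min W ((n : Int) + 1) = min W (n : Int) by omega]
      · rw [if_neg hc]
        have hnW : (n : Int) < W :=
          (hchar (n : Int) (by positivity) (by omega)).1 (by simpa using hc)
        rw [show min W (n : Int) = (n : Int) by omega,
          show min W ((n : Int) + 1) = (n : Int) + 1 by omega]
        have hle : (k+1) * ((n : Int)) ≤ (k+1) * ((n : Int) + 1) :=
          mul_le_mul_of_nonneg_left (by omega) (by omega)
        rw [max_assoc, max_eq_right hle]

theorem pv_loopB_step (matrix : List (List String)) (rows i j r width best : Int) (h : r < rows) :
    pvLoopB matrix rows i j r width best =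
      if pvReach matrix r j 0 width = 0 then best
      else pvLoopB matrix rows i j (r+1) (pvReach matrix r j 0 width)
            (max best (pvReach matrix r j 0 width * (r - i + 1))) := by
  rw [pvLoopB, dif_pos h]
  simp only [beq_iff_eq]

theorem pv_loop_eq (matrix : List (List String)) (rows columns i j : Int) (d : Nat) :
    ∀ (a : Nat) (width acc : Int),
    0 < columns - j →
    rows = i + ((a : Int) + (d : Int)) →
    0 ≤ acc → 0 ≤ width → width ≤ columns - j →
    (∀ l : Int, 0 ≤ l → l < columns - j →
      (l < width ↔ ∀ m : Int, 0 ≤ m → m < (a : Int) → l < pvReach matrix (i + m) j 0 (columns - j))) →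
    (PySem.List.pyRange (a : Int) (rows - i) 1).foldl (fun acc k =>
      (PySem.List.pyRange 0 (columns - j) 1).foldl (fun acc2 l =>
        if pvCheckZero matrix i j k l then acc2 else max acc2 ((k+1)*(l+1))) acc) acc
      = pvLoopB matrix rows i j (i + (a : Int)) width acc := by
  induction d with
  | zero =>
      intro a width acc hC hrows hacc hw0 hwC hWchar
      rw [show rows - i = (a : Int) by omega, PySem.List.pyRange_one_eq_nil le_rfl,
        List.foldl_nil, pvLoopB, dif_neg (by omega)]
  | succ d ih =>
      intro a width acc hC hrows hacc hw0 hwC hWchar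
      set g := pvReach matrix (i + (a : Int)) j 0 (columns - j) with hg_def
      set w := pvReach matrix (i + (a : Int)) j 0 width with hw_def
      have hwmin : w = min width g := pv_reach_min matrix (i + (a : Int)) j 0 width (columns - j) hwC hw0
      have hw_ge : (0 : Int) ≤ w := pv_reach_ge matrix (i + (a : Int)) j 0 width
      have hg_ge : (0 : Int) ≤ g := pv_reach_ge matrix (i + (a : Int)) j 0 (columns - j)
      have hw_le : w ≤ width := by
        have := pv_reach_le matrix (i + (a : Int)) j 0 width; omega
      have htoNat : (((columns - j).toNat : Nat) : Int) = columns - j := by omega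
      have hcharA : ∀ l : Int, 0 ≤ l → l < (((columns - j).toNat : Nat) : Int) →
          (pvCheckZero matrix i j (a : Int) l = false ↔ l < w) := by
        intro l hl0 hln
        have hlC : l < columns - j := by omega
        have hiff := pv_check_iff matrix i j (columns - j) (a : Int) l hl0 hlC
        rw [hwmin]
        constructor
        · intro hfalse
          by_contra hge
          have hex : ∃ m, 0 ≤ m ∧ m ≤ (a : Int) ∧ pvReach matrix (i + m) j 0 (columns - j) ≤ l := by
            rcases (by omega : width ≤ l ∨ g ≤ l) with hcase | hcase
            · have hnall : ¬ ∀ m : Int, 0 ≤ m → m < (a : Int) →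
                  l < pvReach matrix (i + m) j 0 (columns - j) := by
                intro hall
                have := (hWchar l hl0 hlC).2 hall
                omega
              push Not at hnall
              obtain ⟨m, hm0, hma, hmle⟩ := hnall
              exact ⟨m, hm0, by omega, by omega⟩
            · exact ⟨(a : Int), by positivity, le_rfl, hcase⟩
          have htrue := hiff.2 hex
          rw [hfalse] at htrue
          exact Bool.false_ne_true htrue
        · intro hlw
          cases hb : pvCheckZero matrix i j (a : Int) l with
          | false => rfl
          | true =>
              exfalso
              obtain ⟨m, hm0, hma, hre⟩ := hiff.1 hb
              rcases eq_or_lt_of_le hma with he | hlt'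
              · rw [he] at hre; omega
              · have := (hWchar l hl0 hlC).1 (by omega) m hm0 (by omega)
                omega
      have hinner := pv_inner_eq matrix i j (a : Int) acc w (columns - j).toNat hacc
        (by positivity) hw_ge hcharA
      rw [htoNat] at hinner
      rw [PySem.List.pyRange_one_cons (by omega : (a : Int) < rows - i), List.foldl_cons, hinner,
        show min w (columns - j) = w by omega,
        pv_loopB_step matrix rows i j (i + (a : Int)) width acc (by omega), ← hw_def]
      by_cases hweq : w = 0
      · rw [if_pos hweq, hweq, mul_zero, max_eq_left hacc]
        have hrest := ih (a + 1) 0 acc hC (by push_cast; omega) hacc le_rfl (by omega)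
          (by
            intro l hl0 hlC
            constructor
            · intro hl; omega
            · intro hall
              exfalso
              rcases (by omega : width = 0 ∨ g = 0) with hcase | hcase
              · have hnall : ¬ ∀ m : Int, 0 ≤ m → m < (a : Int) →
                    l < pvReach matrix (i + m) j 0 (columns - j) := by
                  intro hall'
                  have := (hWchar l hl0 hlC).2 hall'
                  omega
                push Not at hnall
                obtain ⟨m, hm0, hma, hmle⟩ := hnall
                have := hall m hm0 (by omega)
                omega
              · have := hall (a : Int) (by positivity) (by omega)
                omega)
        rw [show (((a + 1 : Nat) : Nat) : Int) = (a : Int) + 1 by push_cast; ring] at hrest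
        rw [hrest, pv_loopB_width_nonpos matrix rows i j (i + ((a : Int) + 1)) 0 acc le_rfl]
      · rw [if_neg hweq]
        have hrest := ih (a + 1) w (max acc (((a : Int) + 1) * w)) hC (by push_cast; omega)
          (by omega) hw_ge (by omega)
          (by
            intro l hl0 hlC
            constructor
            · intro hlw m hm0 hma1
              rcases (by omega : m < (a : Int) ∨ m = (a : Int)) with hcase | hcase
              · exact (hWchar l hl0 hlC).1 (by omega) m hm0 hcase
              · rw [hcase]; omega
            · intro hall
              have h1 : l < width := (hWchar l hl0 hlC).2
                (fun m hm0 hma => hall m hm0 (by omega))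
              have h2 : l < g := hall (a : Int) (by positivity) (by omega)
              omega)
        rw [show (((a + 1 : Nat) : Nat) : Int) = (a : Int) + 1 by push_cast; ring] at hrest
        rw [hrest, show i + (a : Int) + 1 = i + ((a : Int) + 1) by ring,
          show i + (a : Int) - i + 1 = (a : Int) + 1 by ring, mul_comm w ((a : Int) + 1)]

-- ===== VERDICT (by name: the statement is the Claim_ definition above) =====
theorem get_max_sub_matrix_area_spec : Claim_equal_get_max_sub_matrix_area := by
  intro matrix rows columns i j hDom hPre
  unfold Spec_get_max_sub_matrix_area get_max_sub_matrix_area get_max_sub_matrix_area_alt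
  by_cases h1 : rows ≤ i
  · rw [show PySem.List.pyRange 0 (rows - i) 1 = [] from PySem.List.pyRange_one_eq_nil (by omega),
      List.foldl_nil, pvLoopB, dif_neg (by omega)]
  · by_cases h2 : columns ≤ j
    · rw [pv_loopB_width_nonpos matrix rows i j i (columns - j) 0 (by omega)]
      have hinner : ∀ (acc k : Int), (PySem.List.pyRange 0 (columns - j) 1).foldl
          (fun acc2 l => if pvCheckZero matrix i j k l then acc2 else max acc2 ((k+1)*(l+1))) acc = acc := by
        intro acc k
        rw [PySem.List.pyRange_one_eq_nil (by omega), List.foldl_nil]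
      simp only [hinner]
      exact List.foldl_fixed _
    · have := pv_loop_eq matrix rows columns i j (rows - i).toNat 0 (columns - j) 0
        (by omega) (by push_cast; omega) le_rfl (by omega) le_rfl
        (by
          intro l hl0 hlC
          constructor
          · intro _ m hm0 hm
            exfalso; push_cast at hm; omega
          · intro _; exact hlC)
      simpa using this
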